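-- pv_equiv track=rewrite | github.com/medre22932-png/subtitle | subtitle_dub.py | choose_split_index
-- ===== SOURCE A (Python) =====
-- SPLIT_PUNCTUATION = {".", "!", "?", ";", ":", ","}
--
-- STRONG_PUNCTUATION = {".", "!", "?", ";"}
--
-- def token_has_split_punctuation(token):
--     stripped = token.rstrip('\'"”’)]}')
--     return any(ch in stripped for ch in SPLIT_PUNCTUATION)
--
-- def token_has_strong_punctuation(token):
--     stripped = token.rstrip('\'"”’)]}')
--     return any(ch in stripped for ch in STRONG_PUNCTUATION)
--
-- def choose_split_index(tokens, start_idx=0, trigger_length=18, target=12, max_valid=20, hard_limit=42):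
--     remaining = len(tokens) - start_idx
--
--     # If the text is 18 words or shorter, don't split
--     if remaining <= trigger_length:
--         return None
--
--     # Helper function to find word positions (relative to current chunk) that contain punctuation
--     def get_puncts(check_func):
--         puncts = []
--         for loc in range(1, remaining + 1):
--             idx = start_idx + loc - 1
--             if check_func(tokens[idx][0]):
--                 puncts.append(loc)  # loc is the length of the left part if we split here
--         return puncts
--
--     strong_puncts = get_puncts(token_has_strong_punctuation)
--     weak_puncts = get_puncts(token_has_split_punctuation) # Note: this includes strong punctuation too
--
--     # 1. Closest STRONG punctuation to the 12th word
--     if strong_puncts: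
--         closest_strong = min(strong_puncts, key=lambda x: abs(x - target))
--         # Ensure neither the left part nor the remaining right part exceeds 20 words
--         if closest_strong <= max_valid and (remaining - closest_strong) <= max_valid:
--             return start_idx + closest_strong
--
--     # 2. Fallback: First STRONG punctuation after 12 until 20
--     strong_13_to_20 = [x for x in strong_puncts if target < x <= max_valid]
--     if strong_13_to_20:
--         return start_idx + strong_13_to_20[0]
--
--     # 3. Closest WEAK punctuation to the 12th word
--     if weak_puncts:
--         closest_weak = min(weak_puncts, key=lambda x: abs(x - target))
--         # Ensure neither the left part nor the remaining right part exceeds 20 words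
--         if closest_weak <= max_valid and (remaining - closest_weak) <= max_valid:
--             return start_idx + closest_weak
--
--     # 4. Fallback: First WEAK punctuation after 12 until 20
--     weak_13_to_20 = [x for x in weak_puncts if target < x <= max_valid]
--     if weak_13_to_20:
--         return start_idx + weak_13_to_20[0]
--
--     # 5. Fallback: First WEAK or STRONG punctuation after 20 until 42
--     # (weak_puncts naturally contains strong punctuation as well)
--     any_21_to_42 = [x for x in weak_puncts if max_valid < x <= hard_limit]
--     if any_21_to_42:
--         return start_idx + any_21_to_42[0]
--
--     # 6. Hard Limit: If absolutely no punctuation exists, split at the limit (42) or the end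
--     return start_idx + min(remaining, hard_limit)
-- ===== SOURCE B (Python) =====
-- SPLIT_PUNCTUATION = {".", "!", "?", ";", ":", ","}
--
-- STRONG_PUNCTUATION = {".", "!", "?", ";"}
--
--
-- def _classify(token):
--     """Return (strong, weak) flags for a token in one stripping pass."""
--     stripped = token.rstrip('\'"”’)]}')
--     strong = any(ch in stripped for ch in STRONG_PUNCTUATION)
--     weak = strong or (':' in stripped) or (',' in stripped)
--     return strong, weak
--
--
-- def choose_split_index(tokens, start_idx=0, trigger_length=18, target=12, max_valid=20, hard_limit=42):
--     remaining = len(tokens) - start_idx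
--
--     if remaining <= trigger_length:
--         return None
--
--     # One forward pass: keep running candidates instead of building punctuation
--     # lists and re-filtering them.
--     best_strong = first_strong_mid = None
--     best_weak = first_weak_mid = first_ext = None
--     for loc in range(1, remaining + 1):
--         strong, weak = _classify(tokens[start_idx + loc - 1][0])
--         if strong:
--             if best_strong is None or abs(loc - target) < abs(best_strong - target):
--                 best_strong = loc
--             if first_strong_mid is None and target < loc <= max_valid:
--                 first_strong_mid = loc
--         if weak:
--             if best_weak is None or abs(loc - target) < abs(best_weak - target):
--                 best_weak = loc
--             if first_weak_mid is None and target < loc <= max_valid: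
--                 first_weak_mid = loc
--             if first_ext is None and max_valid < loc <= hard_limit:
--                 first_ext = loc
--
--     if best_strong is not None and best_strong <= max_valid and remaining - best_strong <= max_valid:
--         return start_idx + best_strong
--     if first_strong_mid is not None:
--         return start_idx + first_strong_mid
--     if best_weak is not None and best_weak <= max_valid and remaining - best_weak <= max_valid:
--         return start_idx + best_weak
--     if first_weak_mid is not None:
--         return start_idx + first_weak_mid
--     if first_ext is not None:
--         return start_idx + first_ext
--     return start_idx + min(remaining, hard_limit)
-- ===== Notes on version B (the rewrite author's own statement) =====
-- stated objective: alternative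
-- what changed: Instead of building two full punctuation-position lists and re-scanning/re-filtering them per priority level, B classifies each position once in a single forward pass and maintains five running candidates (closest strong/weak with first-wins ties, first strong/weak in (target,max_valid], first any in (max_valid,hard_limit]), then applies the same 6-level priority to the candidates.
import Mathlib
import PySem

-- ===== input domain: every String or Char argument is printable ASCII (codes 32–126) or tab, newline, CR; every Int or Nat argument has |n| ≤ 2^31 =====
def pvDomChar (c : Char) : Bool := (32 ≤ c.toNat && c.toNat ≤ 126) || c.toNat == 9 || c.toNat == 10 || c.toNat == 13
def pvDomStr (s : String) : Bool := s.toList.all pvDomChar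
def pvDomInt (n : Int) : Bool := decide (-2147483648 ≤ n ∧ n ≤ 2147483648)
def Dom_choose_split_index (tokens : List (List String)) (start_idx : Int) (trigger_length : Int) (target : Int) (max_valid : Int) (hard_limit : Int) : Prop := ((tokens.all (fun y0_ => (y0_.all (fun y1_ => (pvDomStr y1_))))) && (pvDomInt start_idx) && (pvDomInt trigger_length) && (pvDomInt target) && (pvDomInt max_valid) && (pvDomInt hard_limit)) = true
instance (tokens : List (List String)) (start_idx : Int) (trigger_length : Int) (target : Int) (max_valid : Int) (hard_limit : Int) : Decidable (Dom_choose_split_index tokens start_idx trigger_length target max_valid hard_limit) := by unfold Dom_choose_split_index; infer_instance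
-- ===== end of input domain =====

-- ===== PORT A =====
-- B re-implements A as a single forward pass with running candidates instead of
-- list building plus per-priority re-filtering (objective: alternative).
-- Characters Python strips from a token's right end before looking for punctuation
def pvStripChars : List Char := ['\'', '"', '”', '’', ')', ']', '}']
def pvSplitPunct : List Char := ['.', '!', '?', ';', ':', ',']
def pvStrongPunct : List Char := ['.', '!', '?', ';']

-- token.rstrip('\'"”’)]}') — hand port of rstrip with a char set (exact: drop trailing
-- characters that are members of the set)
def pvRstrip (token : String) : List Char :=
  (token.toList.reverse.dropWhile (fun c => pvStripChars.contains c)).reverse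

-- tokens[idx][0]; out-of-range / empty inner list raise in Python and are excluded by Pre_
def pvFirstTok (tokens : List (List String)) (idx : Int) : String :=
  (PySem.List.pyGet? ((PySem.List.pyGet? tokens idx).getD []) 0).getD ""

def token_has_split_punctuation (token : String) : Bool :=
  pvSplitPunct.any (fun ch => PySem.Chars.isIn [ch] (pvRstrip token))

def token_has_strong_punctuation (token : String) : Bool :=
  pvStrongPunct.any (fun ch => PySem.Chars.isIn [ch] (pvRstrip token))

def pvGetPuncts (tokens : List (List String)) (start_idx remaining : Int)
    (check : String → Bool) : List Int :=
  (PySem.List.pyRange 1 (remaining + 1)).foldl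
    (fun puncts loc =>
      if check (pvFirstTok tokens (start_idx + loc - 1)) then puncts ++ [loc] else puncts) []

def choose_split_index (tokens : List (List String)) (start_idx : Int) (trigger_length : Int) (target : Int) (max_valid : Int) (hard_limit : Int) : Option Int :=
  let remaining : Int := (tokens.length : Int) - start_idx
  if remaining ≤ trigger_length then none
  else
    let strong_puncts := pvGetPuncts tokens start_idx remaining token_has_strong_punctuation
    let weak_puncts := pvGetPuncts tokens start_idx remaining token_has_split_punctuation
    let stage6 : Option Int := some (start_idx + min remaining hard_limit)
    let stage5 : Option Int :=
      match weak_puncts.filter (fun x => decide (max_valid < x) && decide (x ≤ hard_limit)) with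
      | x :: _ => some (start_idx + x)
      | [] => stage6
    let stage4 : Option Int :=
      match weak_puncts.filter (fun x => decide (target < x) && decide (x ≤ max_valid)) with
      | x :: _ => some (start_idx + x)
      | [] => stage5
    let stage3 : Option Int :=
      match PySem.List.min? weak_puncts (fun x => |x - target|) with
      | some closest_weak =>
          if decide (closest_weak ≤ max_valid) && decide (remaining - closest_weak ≤ max_valid)
          then some (start_idx + closest_weak) else stage4
      | none => stage4
    let stage2 : Option Int :=
      match strong_puncts.filter (fun x => decide (target < x) && decide (x ≤ max_valid)) with
      | x :: _ => some (start_idx + x)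
      | [] => stage3
    match PySem.List.min? strong_puncts (fun x => |x - target|) with
    | some closest_strong =>
        if decide (closest_strong ≤ max_valid) && decide (remaining - closest_strong ≤ max_valid)
        then some (start_idx + closest_strong) else stage2
    | none => stage2

-- ===== PORT B =====
-- Source B's _classify: (strong, weak) flags in one stripping pass
def pvClassify (token : String) : Bool × Bool :=
  let stripped := pvRstrip token
  let strong := pvStrongPunct.any (fun ch => PySem.Chars.isIn [ch] stripped)
  (strong, strong || PySem.Chars.isIn [':'] stripped || PySem.Chars.isIn [','] stripped)

-- one iteration of Source B's single forward scan over the 5-candidate state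
def pvScanStep (tokens : List (List String)) (start_idx target max_valid hard_limit : Int)
    (st : Option Int × Option Int × Option Int × Option Int × Option Int) (loc : Int) :
    Option Int × Option Int × Option Int × Option Int × Option Int :=
  let (bS, fS, bW, fW, fE) := st
  let (strong, weak) := pvClassify (pvFirstTok tokens (start_idx + loc - 1))
  ( if strong && (bS.elim true fun b => decide (|loc - target| < |b - target|)) then some loc else bS,
    if strong && fS.isNone && (decide (target < loc) && decide (loc ≤ max_valid)) then some loc else fS,
    if weak && (bW.elim true fun b => decide (|loc - target| < |b - target|)) then some loc else bW,
    if weak && fW.isNone && (decide (target < loc) && decide (loc ≤ max_valid)) then some loc else fW,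
    if weak && fE.isNone && (decide (max_valid < loc) && decide (loc ≤ hard_limit)) then some loc else fE )

def choose_split_index_alt (tokens : List (List String)) (start_idx : Int) (trigger_length : Int) (target : Int) (max_valid : Int) (hard_limit : Int) : Option Int :=
  let remaining : Int := (tokens.length : Int) - start_idx
  if remaining ≤ trigger_length then none
  else
    let st := (PySem.List.pyRange 1 (remaining + 1)).foldl
      (pvScanStep tokens start_idx target max_valid hard_limit) (none, none, none, none, none)
    let (bS, fS, bW, fW, fE) := st
    if bS.elim false (fun b => decide (b ≤ max_valid) && decide (remaining - b ≤ max_valid)) then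
      bS.map (fun b => start_idx + b)
    else if fS.isSome then fS.map (fun b => start_idx + b)
    else if bW.elim false (fun b => decide (b ≤ max_valid) && decide (remaining - b ≤ max_valid)) then
      bW.map (fun b => start_idx + b)
    else if fW.isSome then fW.map (fun b => start_idx + b)
    else if fE.isSome then fE.map (fun b => start_idx + b)
    else some (start_idx + min remaining hard_limit)

-- ===== PRECONDITION & SPEC =====
-- Pre_ excludes exactly the inputs where Python A raises: the split loop runs
-- (remaining > trigger_length) and some accessed index is out of range
-- (start_idx < -len(tokens)) or some accessed inner token list is empty
-- (IndexError on tokens[idx][0]).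
def Pre_choose_split_index (tokens : List (List String)) (start_idx : Int) (trigger_length : Int) (target : Int) (max_valid : Int) (hard_limit : Int) : Prop :=
  (tokens.length : Int) - start_idx ≤ trigger_length ∨
  (-(tokens.length : Int) ≤ start_idx ∧ ∀ t ∈ tokens.drop start_idx.toNat, t ≠ [])
instance (tokens : List (List String)) (start_idx : Int) (trigger_length : Int) (target : Int) (max_valid : Int) (hard_limit : Int) : Decidable (Pre_choose_split_index tokens start_idx trigger_length target max_valid hard_limit) := by unfold Pre_choose_split_index; infer_instance

def pvWitness_choose_split_index : List (List String) × Int × Int × Int × Int × Int :=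
  ([["a"], ["b."], ["c"]], 0, 1, 1, 2, 3)

def Spec_choose_split_index (tokens : List (List String)) (start_idx : Int) (trigger_length : Int) (target : Int) (max_valid : Int) (hard_limit : Int) (out : Option Int) : Prop := out = choose_split_index_alt tokens start_idx trigger_length target max_valid hard_limit
instance (tokens : List (List String)) (start_idx : Int) (trigger_length : Int) (target : Int) (max_valid : Int) (hard_limit : Int) (out : Option Int) : Decidable (Spec_choose_split_index tokens start_idx trigger_length target max_valid hard_limit out) := by unfold Spec_choose_split_index; infer_instance

-- ===== CLAIM (what is proved, stated in full; the proofs are below) =====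
def Claim_equal_choose_split_index : Prop := ∀ (tokens : List (List String)) (start_idx : Int) (trigger_length : Int) (target : Int) (max_valid : Int) (hard_limit : Int), Dom_choose_split_index tokens start_idx trigger_length target max_valid hard_limit → Pre_choose_split_index tokens start_idx trigger_length target max_valid hard_limit → Spec_choose_split_index tokens start_idx trigger_length target max_valid hard_limit (choose_split_index tokens start_idx trigger_length target max_valid hard_limit)

-- ===== LEMMAS AND PROOFS =====

-- min()'s first-minimum folder, named so both characterizations share one matcher
def pvMinStep (target : Int) (acc : Option Int) (x : Int) : Option Int :=
  match acc with
  | none => some x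
  | some m => if |x - target| < |m - target| then some x else some m

theorem pvWitness_ok :
    Dom_choose_split_index pvWitness_choose_split_index.1 pvWitness_choose_split_index.2.1
      pvWitness_choose_split_index.2.2.1 pvWitness_choose_split_index.2.2.2.1
      pvWitness_choose_split_index.2.2.2.2.1 pvWitness_choose_split_index.2.2.2.2.2 ∧
    Pre_choose_split_index pvWitness_choose_split_index.1 pvWitness_choose_split_index.2.1
      pvWitness_choose_split_index.2.2.1 pvWitness_choose_split_index.2.2.2.1
      pvWitness_choose_split_index.2.2.2.2.1 pvWitness_choose_split_index.2.2.2.2.2 := by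
  decide

-- Source B's classification flags are A's two helper predicates
theorem pvClassify_eq (t : String) :
    pvClassify t = (token_has_strong_punctuation t, token_has_split_punctuation t) := by
  simp [pvClassify, token_has_strong_punctuation, token_has_split_punctuation,
    pvStrongPunct, pvSplitPunct, List.any, Bool.or_assoc]

-- strict-improvement running minimum over the scanned positions = first-minimum fold of the filtered list
theorem foldl_best_eq (P : Int → Bool) (target : Int) :
    ∀ (L : List Int) (acc : Option Int),
      L.foldl (fun acc loc =>
        if P loc && (acc.elim true fun b => decide (|loc - target| < |b - target|))
        then some loc else acc) acc
      = (L.filter P).foldl (pvMinStep target) acc := by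
  intro L
  induction L with
  | nil => intro acc; rfl
  | cons x L ih =>
    intro acc
    simp only [List.foldl_cons, List.filter_cons]
    by_cases hP : P x
    · have hstep :
          (if (P x && acc.elim true fun b => decide (|x - target| < |b - target|)) = true
           then some x else acc) = pvMinStep target acc x := by
        cases acc <;> simp [hP, pvMinStep]
      rw [hstep, if_pos (by simp [hP]), List.foldl_cons]
      exact ih _
    · rw [if_neg (by simp [hP]), if_neg (by simp [hP])]
      exact ih _

-- Python min(xs, key=abs(x-target)) is that fold
theorem min?_eq_foldl_pvMinStep (target : Int) (xs : List Int) :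
    PySem.List.min? xs (fun x => |x - target|) = xs.foldl (pvMinStep target) none := by
  unfold PySem.List.min?
  exact List.foldl_ext _ _ none (fun acc x _ => by cases acc <;> rfl)

-- keep-first fold = head of the doubly filtered list
theorem foldl_first_some (P R : Int → Bool) :
    ∀ (L : List Int) (a : Int),
      L.foldl (fun acc loc => if P loc && acc.isNone && R loc then some loc else acc) (some a)
      = some a := by
  intro L
  induction L with
  | nil => intro a; rfl
  | cons x L ih =>
    intro a
    rw [List.foldl_cons, if_neg (by simp), ih]

theorem foldl_first_eq (P R : Int → Bool) :
    ∀ (L : List Int),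
      L.foldl (fun acc loc => if P loc && acc.isNone && R loc then some loc else acc) none
      = (L.filter (fun x => P x && R x)).head? := by
  intro L
  induction L with
  | nil => rfl
  | cons x L ih =>
    rw [List.foldl_cons, List.filter_cons]
    have hc : (P x && (none : Option Int).isNone && R x) = (P x && R x) := by simp
    rw [hc]
    by_cases h : P x && R x
    · rw [if_pos h, if_pos h, foldl_first_some, List.head?_cons]
    · rw [if_neg h, if_neg h, ih]

theorem foldl_first_head (P R : Int → Bool) (L : List Int) :
    L.foldl (fun acc loc => if P loc && acc.isNone && R loc then some loc else acc) none
    = ((L.filter P).filter R).head? := by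
  rw [foldl_first_eq, List.filter_filter]
  exact congrArg _ (List.filter_congr (fun a _ => by rw [Bool.and_comm]))

-- B's 5-tuple scan splits into five independent folds through A's predicates
theorem scan_decomp (tokens : List (List String)) (start_idx target max_valid hard_limit : Int) :
    ∀ (L : List Int) (a b c d e : Option Int),
      L.foldl (pvScanStep tokens start_idx target max_valid hard_limit) (a, b, c, d, e) =
      ( L.foldl (fun acc loc =>
          if token_has_strong_punctuation (pvFirstTok tokens (start_idx + loc - 1)) &&
             (acc.elim true fun b => decide (|loc - target| < |b - target|))
          then some loc else acc) a,
        L.foldl (fun acc loc =>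
          if token_has_strong_punctuation (pvFirstTok tokens (start_idx + loc - 1)) &&
             acc.isNone && (decide (target < loc) && decide (loc ≤ max_valid))
          then some loc else acc) b,
        L.foldl (fun acc loc =>
          if token_has_split_punctuation (pvFirstTok tokens (start_idx + loc - 1)) &&
             (acc.elim true fun b => decide (|loc - target| < |b - target|))
          then some loc else acc) c,
        L.foldl (fun acc loc =>
          if token_has_split_punctuation (pvFirstTok tokens (start_idx + loc - 1)) &&
             acc.isNone && (decide (target < loc) && decide (loc ≤ max_valid))
          then some loc else acc) d,
        L.foldl (fun acc loc =>
          if token_has_split_punctuation (pvFirstTok tokens (start_idx + loc - 1)) &&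
             acc.isNone && (decide (max_valid < loc) && decide (loc ≤ hard_limit))
          then some loc else acc) e ) := by
  intro L
  induction L with
  | nil => intro a b c d e; rfl
  | cons x L ih =>
    intro a b c d e
    have hstep : pvScanStep tokens start_idx target max_valid hard_limit (a, b, c, d, e) x =
        ( (if token_has_strong_punctuation (pvFirstTok tokens (start_idx + x - 1)) &&
             (a.elim true fun b => decide (|x - target| < |b - target|)) then some x else a),
          (if token_has_strong_punctuation (pvFirstTok tokens (start_idx + x - 1)) &&
             b.isNone && (decide (target < x) && decide (x ≤ max_valid)) then some x else b),
          (if token_has_split_punctuation (pvFirstTok tokens (start_idx + x - 1)) &&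
             (c.elim true fun b => decide (|x - target| < |b - target|)) then some x else c),
          (if token_has_split_punctuation (pvFirstTok tokens (start_idx + x - 1)) &&
             d.isNone && (decide (target < x) && decide (x ≤ max_valid)) then some x else d),
          (if token_has_split_punctuation (pvFirstTok tokens (start_idx + x - 1)) &&
             e.isNone && (decide (max_valid < x) && decide (x ≤ hard_limit)) then some x else e) ) := by
      simp only [pvScanStep, pvClassify_eq]
    simp only [List.foldl_cons]
    rw [hstep]
    exact ih _ _ _ _ _

-- A's accumulating get_puncts loop is a filter of the position range
theorem pvGetPuncts_eq (tokens : List (List String)) (start_idx remaining : Int)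
    (check : String → Bool) :
    pvGetPuncts tokens start_idx remaining check
      = (PySem.List.pyRange 1 (remaining + 1)).filter
          (fun loc => check (pvFirstTok tokens (start_idx + loc - 1))) := by
  unfold pvGetPuncts
  rw [PySem.List.foldl_append_if_eq_filter]
  simp

-- the 6-level priority chain over the five candidates, generalized
theorem select_eq (start_idx remaining max_valid hard_limit : Int)
    (ms mw : Option Int) (l2 l4 l5 : List Int) :
    (match ms with
     | some cs =>
         if decide (cs ≤ max_valid) && decide (remaining - cs ≤ max_valid)
         then some (start_idx + cs)
         else
           match l2 with
           | x :: _ => some (start_idx + x)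
           | [] =>
             match mw with
             | some cw =>
                 if decide (cw ≤ max_valid) && decide (remaining - cw ≤ max_valid)
                 then some (start_idx + cw)
                 else
                   match l4 with
                   | x :: _ => some (start_idx + x)
                   | [] =>
                     match l5 with
                     | x :: _ => some (start_idx + x)
                     | [] => some (start_idx + min remaining hard_limit)
             | none =>
                 match l4 with
                 | x :: _ => some (start_idx + x)
                 | [] =>
                   match l5 with
                   | x :: _ => some (start_idx + x)
                   | [] => some (start_idx + min remaining hard_limit)
     | none =>
         match l2 with
         | x :: _ => some (start_idx + x)
         | [] =>
           match mw with
           | some cw =>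
               if decide (cw ≤ max_valid) && decide (remaining - cw ≤ max_valid)
               then some (start_idx + cw)
               else
                 match l4 with
                 | x :: _ => some (start_idx + x)
                 | [] =>
                   match l5 with
                   | x :: _ => some (start_idx + x)
                   | [] => some (start_idx + min remaining hard_limit)
           | none =>
               match l4 with
               | x :: _ => some (start_idx + x)
               | [] =>
                 match l5 with
                 | x :: _ => some (start_idx + x)
                 | [] => some (start_idx + min remaining hard_limit)) =
    (if ms.elim false (fun b => decide (b ≤ max_valid) && decide (remaining - b ≤ max_valid)) then
       ms.map (fun b => start_idx + b)
     else if l2.head?.isSome then l2.head?.map (fun b => start_idx + b)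
     else if mw.elim false (fun b => decide (b ≤ max_valid) && decide (remaining - b ≤ max_valid)) then
       mw.map (fun b => start_idx + b)
     else if l4.head?.isSome then l4.head?.map (fun b => start_idx + b)
     else if l5.head?.isSome then l5.head?.map (fun b => start_idx + b)
     else some (start_idx + min remaining hard_limit)) := by
  rcases ms with _ | cs <;> rcases mw with _ | cw <;>
    rcases l2 with _ | ⟨x2, l2⟩ <;> rcases l4 with _ | ⟨x4, l4⟩ <;> rcases l5 with _ | ⟨x5, l5⟩ <;>
    simp [Option.elim] <;> split_ifs <;> simp_all

-- ===== VERDICT (by name: the statement is the Claim_ definition above) =====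
theorem choose_split_index_spec : Claim_equal_choose_split_index := by
  intro tokens start_idx trigger_length target max_valid hard_limit _hdom _hpre
  unfold Spec_choose_split_index choose_split_index choose_split_index_alt
  by_cases hg : (tokens.length : Int) - start_idx ≤ trigger_length
  · simp [hg]
  · simp only [hg, if_false]
    rw [scan_decomp, foldl_best_eq, foldl_best_eq, foldl_first_head, foldl_first_head,
        foldl_first_head, pvGetPuncts_eq, pvGetPuncts_eq,
        min?_eq_foldl_pvMinStep, min?_eq_foldl_pvMinStep]
    exact select_eq _ _ _ _ _ _ _ _ _
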